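-- pv_equiv track=rewrite | github.com/Ryan-Koch/child-care-provider-scraper | provider_scrape/spiders/rhode_island.py | _summarize_compliance
-- ===== SOURCE A (Python) =====
-- def _summarize_compliance(domains):
--     """Roll up domain-level compliance into a single 'compliant/total' string,
--     or None if the visit reports no domains."""
--     if not domains:
--         return None
--     compliant = 0
--     total = 0
--     for d in domains:
--         items = d.get("items") or []
--         for item in items:
--             total += 1
--             if not item.get("isNonCompliant"):
--                 compliant += 1
--     if total == 0:
--         return None
--     return f"{compliant}/{total}"
-- ===== SOURCE B (Python) =====
-- def _tally(domains):
--     """Recursively aggregate (total_items, noncompliant_items) over the domain list."""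
--     if not domains:
--         return (0, 0)
--     items = domains[0].get("items") or []
--     t, b = _tally(domains[1:])
--     return (t + len(items), b + sum(1 for it in items if it.get("isNonCompliant")))
--
-- def _summarize_compliance(domains):
--     if not domains:
--         return None
--     total, bad = _tally(domains)
--     if total == 0:
--         return None
--     return "%d/%d" % (total - bad, total)
-- ===== Notes on version B (the rewrite author's own statement) =====
-- stated objective: alternative
-- what changed: B recursively folds the domain list into a (total, noncompliant) pair counting the complement (non-compliant items) and derives compliant = total - bad by subtraction, instead of A's iterative fused loop threading a compliant counter directly.
import Mathlib
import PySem

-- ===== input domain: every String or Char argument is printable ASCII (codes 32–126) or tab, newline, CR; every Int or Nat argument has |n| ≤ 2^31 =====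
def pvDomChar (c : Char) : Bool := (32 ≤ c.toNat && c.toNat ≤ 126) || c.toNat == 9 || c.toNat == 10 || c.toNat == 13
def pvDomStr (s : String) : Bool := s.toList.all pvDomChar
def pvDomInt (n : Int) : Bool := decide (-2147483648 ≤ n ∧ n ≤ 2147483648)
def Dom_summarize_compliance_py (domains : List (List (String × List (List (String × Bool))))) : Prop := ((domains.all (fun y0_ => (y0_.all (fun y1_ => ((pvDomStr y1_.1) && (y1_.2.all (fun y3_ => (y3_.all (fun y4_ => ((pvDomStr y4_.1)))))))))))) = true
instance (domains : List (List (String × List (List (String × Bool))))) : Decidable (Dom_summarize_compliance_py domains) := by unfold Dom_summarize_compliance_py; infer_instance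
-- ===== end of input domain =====

-- B recursively tallies (total, non-compliant) and derives compliant by subtraction (alternative decomposition; same O(n)).
-- ===== PORT A =====
def summarize_compliance_py (domains : List (List (String × List (List (String × Bool))))) : Option String :=
  if domains.isEmpty then none
  else
    let acc := domains.foldl (fun (acc : Int × Int) d =>
      let items := ((PySem.Dict.mk d).get? "items").getD []
      items.foldl (fun (acc2 : Int × Int) item =>
        let total := acc2.2 + 1
        let compliant :=
          if ((PySem.Dict.mk item).get? "isNonCompliant").getD false = false then acc2.1 + 1
          else acc2.1
        (compliant, total)) acc) (0, 0)
    if acc.2 = 0 then none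
    else some (PySem.Int.toStr acc.1 ++ "/" ++ PySem.Int.toStr acc.2)

-- ===== PORT B =====
-- recursive helper _tally: returns (total, noncompliant), recursing on the tail
def pv_tally (domains : List (List (String × List (List (String × Bool))))) : Int × Int :=
  match domains with
  | [] => (0, 0)
  | d :: ds =>
      let items := ((PySem.Dict.mk d).get? "items").getD []
      let tb := pv_tally ds
      (tb.1 + (items.length : Int),
       tb.2 + (items.countP (fun it => ((PySem.Dict.mk it).get? "isNonCompliant").getD false == true) : Int))

def summarize_compliance_py_alt (domains : List (List (String × List (List (String × Bool))))) : Option String :=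
  if domains.isEmpty then none
  else
    let tb := pv_tally domains
    if tb.1 = 0 then none
    else some (PySem.Int.toStr (tb.1 - tb.2) ++ "/" ++ PySem.Int.toStr tb.1)

-- ===== PRECONDITION & SPEC =====
def Spec_summarize_compliance_py (domains : List (List (String × List (List (String × Bool))))) (out : Option String) : Prop := out = summarize_compliance_py_alt domains
instance (domains : List (List (String × List (List (String × Bool))))) (out : Option String) : Decidable (Spec_summarize_compliance_py domains out) := by unfold Spec_summarize_compliance_py; infer_instance

-- ===== CLAIM (what is proved, stated in full; the proofs are below) =====
def Claim_equal_summarize_compliance_py : Prop := ∀ (domains : List (List (String × List (List (String × Bool))))), Dom_summarize_compliance_py domains → Spec_summarize_compliance_py domains (summarize_compliance_py domains)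

-- ===== LEMMAS AND PROOFS =====

-- inner loop invariant: A's fused item loop adds the item count to total and the compliant count to compliant
theorem pv_inner_inv (items : List (List (String × Bool))) (acc : Int × Int) :
    items.foldl (fun (acc2 : Int × Int) item =>
        let total := acc2.2 + 1
        let compliant :=
          if ((PySem.Dict.mk item).get? "isNonCompliant").getD false = false then acc2.1 + 1
          else acc2.1
        (compliant, total)) acc
      = (acc.1 + (items.countP (fun item => ((PySem.Dict.mk item).get? "isNonCompliant").getD false == false) : Int),
         acc.2 + (items.length : Int)) := by
  induction items generalizing acc with
  | nil => simp
  | cons x xs ih =>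
      simp only [List.foldl_cons, List.countP_cons, List.length_cons, ih]
      by_cases h : ((PySem.Dict.mk x).get? "isNonCompliant").getD false = false <;>
        simp [h, Prod.ext_iff] <;> omega

-- each item list splits into its non-compliant and compliant counts
theorem pv_count_split (items : List (List (String × Bool))) :
    (items.length : Int)
      = (items.countP (fun it => ((PySem.Dict.mk it).get? "isNonCompliant").getD false == true) : Int)
        + (items.countP (fun it => ((PySem.Dict.mk it).get? "isNonCompliant").getD false == false) : Int) := by
  induction items with
  | nil => simp
  | cons x xs ih =>
      rw [List.length_cons, List.countP_cons, List.countP_cons]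
      have hcase : (((PySem.Dict.mk x).get? "isNonCompliant").getD false == true) = true ∧
            (((PySem.Dict.mk x).get? "isNonCompliant").getD false == false) = false ∨
          (((PySem.Dict.mk x).get? "isNonCompliant").getD false == true) = false ∧
            (((PySem.Dict.mk x).get? "isNonCompliant").getD false == false) = true := by
        cases hb : ((PySem.Dict.mk x).get? "isNonCompliant").getD false <;> simp
      rcases hcase with ⟨h1, h2⟩ | ⟨h1, h2⟩ <;> rw [h1, h2] <;> simp only [reduceIte] <;> push_cast <;> omega

-- A's outer fold computes (compliant, total) where compliant = total - noncompliant, i.e. A's pair is tally's pair swapped and complemented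
theorem pv_outer_eq_tally (domains : List (List (String × List (List (String × Bool))))) (acc : Int × Int) :
    domains.foldl (fun (acc : Int × Int) d =>
      let items := ((PySem.Dict.mk d).get? "items").getD []
      items.foldl (fun (acc2 : Int × Int) item =>
        let total := acc2.2 + 1
        let compliant :=
          if ((PySem.Dict.mk item).get? "isNonCompliant").getD false = false then acc2.1 + 1
          else acc2.1
        (compliant, total)) acc) acc
      = (acc.1 + ((pv_tally domains).1 - (pv_tally domains).2), acc.2 + (pv_tally domains).1) := by
  induction domains generalizing acc with
  | nil => simp [pv_tally]
  | cons d ds ih =>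
      rw [List.foldl_cons, pv_inner_inv, ih]
      simp only [pv_tally, Prod.ext_iff]
      have h := pv_count_split (((PySem.Dict.mk d).get? "items").getD [])
      constructor <;> omega

-- ===== VERDICT (by name: the statement is the Claim_ definition above) =====
theorem summarize_compliance_py_spec : Claim_equal_summarize_compliance_py := by
  intro domains _
  unfold Spec_summarize_compliance_py summarize_compliance_py summarize_compliance_py_alt
  by_cases hne : domains.isEmpty
  · simp [hne]
  · simp only [hne, pv_outer_eq_tally]
    simp
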